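-- pv_equiv track=rewrite | github.com/GLevk/nt-test | task1/task1.py | get_array_path
-- ===== SOURCE A (Python) =====
-- def get_array_path(n, m):
--     path = []
--     arr = [i + 1 for i in range(n)]
--     current_pos = 0
--
--     while True:
--         path.append(arr[current_pos])
--         current_pos = (current_pos + m - 1) % n
--
--         if arr[current_pos] == arr[0]:
--             break
--
--     return ''.join(map(str, path))
-- ===== SOURCE B (Python) =====
-- def get_array_path(n, m):
--     s = (m - 1) % n
--     g, b = n, s
--     while b:
--         g, b = b, g % b
--     return ''.join(str(k * s % n + 1) for k in range(n // g))
-- ===== Notes on version B (the rewrite author's own statement) =====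
-- stated objective: faster
-- what changed: B replaces A's explicit position-stepping loop (which materializes arr = [1..n] and walks until the position returns to 0) by number theory: the cycle length is n // gcd(n, (m-1) % n), so the result is built directly over range of that length without constructing arr or stepping.
import Mathlib
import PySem

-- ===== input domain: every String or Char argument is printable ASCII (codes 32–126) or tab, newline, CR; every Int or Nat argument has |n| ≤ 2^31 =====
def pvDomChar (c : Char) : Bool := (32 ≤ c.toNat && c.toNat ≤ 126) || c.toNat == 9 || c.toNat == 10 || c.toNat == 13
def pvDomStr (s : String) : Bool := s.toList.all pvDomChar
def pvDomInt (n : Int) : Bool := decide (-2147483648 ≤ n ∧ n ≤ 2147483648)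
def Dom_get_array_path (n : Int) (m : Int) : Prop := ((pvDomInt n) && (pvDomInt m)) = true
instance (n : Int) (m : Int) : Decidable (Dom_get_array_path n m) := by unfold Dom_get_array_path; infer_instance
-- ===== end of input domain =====

-- B replaces A's position-stepping loop by the closed cycle length n // gcd(n, (m-1) % n).

-- ===== PORT A =====
-- A's `while True` loop; on every input A returns on (n ≥ 1) the walk revisits index 0
-- within n iterations, so fuel n.toNat is sufficient and the port is exact there.
def pvALoop (arr : List Int) (n m : Int) : Nat → Int → List Int → List Int
  | 0, _, path => path
  | fuel+1, cur, path =>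
    let path2 := path ++ [PySem.List.pyGetD arr cur 0]
    let cur2 := PySem.Int.mod (cur + m - 1) n
    if PySem.List.pyGetD arr cur2 0 = PySem.List.pyGetD arr 0 0 then path2
    else pvALoop arr n m fuel cur2 path2

def get_array_path (n : Int) (m : Int) : String :=
  let arr := (PySem.List.pyRange 0 n 1).map (fun i => i + 1)
  PySem.Str.join "" ((pvALoop arr n m n.toNat 0 []).map PySem.Int.toStr)

-- ===== PORT B =====
-- Source B's hand-written Euclid loop: while b: g, b = b, g % b
def pvBGcd (g b : Int) : Int :=
  if _hb : b = 0 then g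
  else pvBGcd b (PySem.Int.mod g b)
termination_by b.natAbs
decreasing_by
  rcases lt_or_gt_of_ne _hb with h | h
  · have := PySem.Int.mod_neg_bounds (a := g) h
    omega
  · have h1 := PySem.Int.mod_nonneg (a := g) h
    have h2 := PySem.Int.mod_lt (a := g) h
    omega

def get_array_path_alt (n : Int) (m : Int) : String :=
  let s := PySem.Int.mod (m - 1) n
  let g := pvBGcd n s
  PySem.Str.join "" ((PySem.List.pyRange 0 (PySem.Int.floordiv n g) 1).map
    (fun k => PySem.Int.toStr (PySem.Int.mod (k * s) n + 1)))

-- ===== PRECONDITION & SPEC =====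
-- Python A raises IndexError for every n ≤ 0 (arr is empty); it returns on every n ≥ 1.
def Pre_get_array_path (n : Int) (m : Int) : Prop := 1 ≤ n
instance (n : Int) (m : Int) : Decidable (Pre_get_array_path n m) := by unfold Pre_get_array_path; infer_instance
def pvWitness_get_array_path : Int × Int := (5, 3)
def Spec_get_array_path (n : Int) (m : Int) (out : String) : Prop := out = get_array_path_alt n m
instance (n : Int) (m : Int) (out : String) : Decidable (Spec_get_array_path n m out) := by unfold Spec_get_array_path; infer_instance

-- ===== CLAIM (what is proved, stated in full; the proofs are below) =====
def Claim_equal_get_array_path : Prop := ∀ (n : Int) (m : Int), Dom_get_array_path n m → Pre_get_array_path n m → Spec_get_array_path n m (get_array_path n m)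

-- ===== LEMMAS AND PROOFS =====

-- Euclid's loop computes the gcd (for the arguments it is called on: 0 < g, 0 ≤ b).
theorem pvBGcd_eq_gcd (k : Nat) : ∀ (g b : Int), b.natAbs ≤ k → 0 ≤ b → 0 < g →
    pvBGcd g b = (Int.gcd g b : Int) := by
  induction k with
  | zero =>
    intro g b hk hb hg
    have hb0 : b = 0 := by omega
    subst hb0
    rw [pvBGcd]
    simp [abs_of_pos hg]
  | succ k ih =>
    intro g b hk hb hg
    by_cases hb0 : b = 0
    · subst hb0
      rw [pvBGcd]
      simp [abs_of_pos hg]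
    · have hbpos : 0 < b := by omega
      rw [pvBGcd]
      simp only [hb0, dite_false]
      rw [PySem.Int.mod_eq_emod_of_pos hbpos]
      have hr0 : 0 ≤ g % b := Int.emod_nonneg g (by omega)
      have hrb : g % b < b := Int.emod_lt_of_pos g hbpos
      rw [ih b (g % b) (by omega) hr0 hbpos]
      -- gcd recursion, on the Nat side
      congr 1
      have hgG : g = ((g.toNat : Nat) : Int) := by omega
      have hbB : b = ((b.toNat : Nat) : Int) := by omega
      rw [hgG, hbB, ← Int.natCast_emod]
      simp only [Int.gcd_natCast_natCast]
      exact (Nat.gcd_comm _ _).trans (((Nat.gcd_rec b.toNat g.toNat).symm).trans (Nat.gcd_comm _ _))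

-- cycle length L = N / gcd N S : positivity, divisibility, minimality
theorem pvL_pos (N S : Nat) (hN : 0 < N) : 0 < N / N.gcd S :=
  Nat.div_pos (Nat.le_of_dvd hN (Nat.gcd_dvd_left N S)) (Nat.gcd_pos_of_pos_left S hN)

theorem pvL_dvd (N S : Nat) : N ∣ (N / N.gcd S) * S := by
  set g := N.gcd S with hg
  obtain ⟨S', hS'⟩ : g ∣ S := Nat.gcd_dvd_right N S
  refine ⟨S', ?_⟩
  rw [hS', ← mul_assoc, mul_comm (N / g) g, Nat.mul_div_cancel' (Nat.gcd_dvd_left N S)]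

theorem pvL_min (N S k : Nat) (hN : 0 < N) (hk : 0 < k) (hkL : k < N / N.gcd S) :
    ¬ N ∣ k * S := by
  intro hdvd
  have hgpos : 0 < N.gcd S := Nat.gcd_pos_of_pos_left S hN
  have hcop : (N / N.gcd S).Coprime (S / N.gcd S) := Nat.coprime_div_gcd_div_gcd hgpos
  have hNg : N / N.gcd S * N.gcd S = N := Nat.div_mul_cancel (Nat.gcd_dvd_left N S)
  have hSg : S / N.gcd S * N.gcd S = S := Nat.div_mul_cancel (Nat.gcd_dvd_right N S)
  have h2 : (N / N.gcd S) * N.gcd S ∣ (k * (S / N.gcd S)) * N.gcd S := by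
    rw [hNg, mul_assoc, hSg]; exact hdvd
  have h3 : (N / N.gcd S) ∣ k * (S / N.gcd S) :=
    (Nat.mul_dvd_mul_iff_right hgpos).mp h2
  have h4 : (N / N.gcd S) ∣ k := hcop.dvd_of_dvd_mul_right h3
  have := Nat.le_of_dvd hk h4
  omega

-- one loop step of the position: (j*s % n + m - 1) % n = ((j+1)*s) % n  when s = (m-1) % n
theorem pvStep_emod (n m s j : Int) (hs : s = (m - 1) % n) :
    (j * s % n + m - 1) % n = ((j + 1) * s) % n := by
  have h1 : (j * s % n + m - 1) % n = (j * s % n + (m - 1)) % n := by ring_nf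
  have h2 : (j * s % n + (m - 1)) % n = (j * s + (m - 1)) % n := by
    rw [Int.add_emod, Int.emod_emod_of_dvd _ dvd_rfl, ← Int.add_emod]
  have h3 : (j * s + (m - 1)) % n = (j * s + s) % n := by
    have hss : s % n = s := by rw [hs, Int.emod_emod_of_dvd _ dvd_rfl]
    rw [Int.add_emod (j*s) (m-1), ← hs, Int.add_emod (j*s) s, hss]
  rw [h1, h2, h3]
  ring_nf

-- the loop, started at position j*s % n with enough fuel, emits the values for k = j, …, L-1
theorem pvALoop_eq (n m s : Int) (L : Nat)
    (hn : 0 < n) (hs : s = (m - 1) % n)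
    (hLd : ((L : Int) * s) % n = 0)
    (hLm : ∀ k : Nat, 0 < k → k < L → ((k : Int) * s) % n ≠ 0) :
    ∀ (fuel j : Nat) (path : List Int), j < L → L ≤ j + fuel →
    pvALoop ((PySem.List.pyRange 0 n 1).map (fun i => i + 1)) n m fuel (((j : Int) * s) % n) path
      = path ++ (List.range (L - j)).map (fun i => (((j + i : Nat) : Int) * s) % n + 1) := by
  intro fuel
  induction fuel with
  | zero => intro j path h1 h2; omega
  | succ fuel ih =>
    intro j path hjL hfuel
    have hcur0 : 0 ≤ ((j : Int) * s) % n := Int.emod_nonneg _ (by omega)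
    have hcurn : ((j : Int) * s) % n < n := Int.emod_lt_of_pos _ hn
    have hcur20 : 0 ≤ (((j : Int) + 1) * s) % n := Int.emod_nonneg _ (by omega)
    have hcur2n : (((j : Int) + 1) * s) % n < n := Int.emod_lt_of_pos _ hn
    rw [pvALoop]
    rw [PySem.Int.mod_eq_emod_of_pos hn, pvStep_emod n m s (j : Int) hs]
    rw [PySem.List.pyGetD_map_pyRange_of_nonneg _ n _ 0 hcur0 hcurn]
    rw [PySem.List.pyGetD_map_pyRange_of_nonneg _ n _ 0 hcur20 hcur2n]
    rw [PySem.List.pyGetD_map_pyRange_of_nonneg _ n 0 0 le_rfl (by omega)]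
    by_cases hcase : j + 1 = L
    · have hz : (((j : Int) + 1) * s) % n = 0 := by
        have : ((j : Int) + 1) = ((L : Nat) : Int) := by omega
        rw [this]; exact hLd
      rw [if_pos (by rw [hz])]
      have : L - j = 1 := by omega
      rw [this]
      simp
    · have hnz : (((j : Int) + 1) * s) % n ≠ 0 := by
        have hcast : ((j : Int) + 1) = (((j + 1 : Nat)) : Int) := by push_cast; ring
        rw [hcast]
        exact hLm (j + 1) (by omega) (by omega)
      rw [if_neg (by omega)]
      have hrec := ih (j + 1) (path ++ [(j : Int) * s % n + 1]) (by omega) (by omega)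
      have hcast : (((j + 1 : Nat)) : Int) = ((j : Int) + 1) := by push_cast; ring
      rw [hcast] at hrec
      rw [hrec, List.append_assoc]
      congr 1
      have hLj : L - j = (L - (j + 1)) + 1 := by omega
      rw [hLj, List.range_succ_eq_map, List.map_cons, List.map_map]
      simp only [Nat.add_zero, List.cons_append, List.nil_append]
      congr 1
      apply List.map_congr_left
      intro i _
      have : j + 1 + i = j + (i + 1) := by omega
      simp [Function.comp, Nat.succ_eq_add_one, this]

-- ===== VERDICT (by name: the statement is the Claim_ definition above) =====
theorem get_array_path_spec : Claim_equal_get_array_path := by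
  intro n m _ hpre
  unfold Pre_get_array_path at hpre
  unfold Spec_get_array_path get_array_path get_array_path_alt
  simp only
  have hn : 0 < n := hpre
  set s : Int := PySem.Int.mod (m - 1) n with hsdef
  have hs : s = (m - 1) % n := PySem.Int.mod_eq_emod_of_pos hn
  have hs0 : 0 ≤ s := by rw [hs]; exact Int.emod_nonneg _ (by omega)
  set N : Nat := n.toNat with hNdef
  set S : Nat := s.toNat with hSdef
  have hnN : n = (N : Int) := by omega
  have hsS : s = (S : Int) := by omega
  -- the gcd computed by B
  have hgcd : pvBGcd n s = ((N.gcd S : Nat) : Int) := by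
    rw [pvBGcd_eq_gcd s.natAbs n s le_rfl hs0 hn]
    congr 1
    rw [Int.gcd_def]
    congr 1 <;> omega
  set L : Nat := N / N.gcd S with hLdef
  have hLpos : 0 < L := pvL_pos N S (by omega)
  -- divisibility facts transported to Int emod
  have hLd : ((L : Int) * s) % n = 0 := by
    rw [hsS, hnN, ← Int.natCast_mul, (PySem.Int.emod_eq_zero_iff_dvd _ _)]
    exact_mod_cast pvL_dvd N S
  have hLm : ∀ k : Nat, 0 < k → k < L → ((k : Int) * s) % n ≠ 0 := by
    intro k hk hkL hz
    rw [hsS, hnN, ← Int.natCast_mul, (PySem.Int.emod_eq_zero_iff_dvd _ _)] at hz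
    exact pvL_min N S k (by omega) hk hkL (by exact_mod_cast hz)
  -- the A-side loop result
  have hloop := pvALoop_eq n m s L hn hs hLd hLm n.toNat 0 [] hLpos
    (by simpa using Nat.div_le_self N (N.gcd S))
  simp only [Nat.cast_zero, zero_mul, Int.zero_emod, Nat.sub_zero, List.nil_append,
    Nat.zero_add] at hloop
  rw [hloop]
  -- the B-side range
  rw [hgcd, hnN, PySem.Int.floordiv_natCast, PySem.List.pyRange_one]
  simp only [Int.sub_zero, Int.toNat_natCast, List.map_map]
  rw [← hnN, ← hLdef]
  congr 1
  apply List.map_congr_left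
  intro k _
  simp only [Function.comp]
  rw [PySem.Int.mod_eq_emod_of_pos hn]
  ring_nf
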